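-- pv_equiv track=rewrite | github.com/The6P4C/adventofcode | 2015/day15/part2.py | cook
-- ===== SOURCE A (Python) =====
-- def cook(totals, ingredient_data):
-- 	final_product = {
-- 		'capacity': 0,
-- 		'durability': 0,
-- 		'flavor': 0,
-- 		'texture': 0,
-- 		'calories': 0
-- 	}
--
-- 	for i in range(0, len(totals)):
-- 		total = totals[i]
-- 		current_ingredient_data = ingredient_data[i]
--
-- 		for prop in final_product:
-- 			final_product[prop] += current_ingredient_data[prop] * total
--
-- 	if final_product['calories'] != 500:
-- 		return -1
--
-- 	final_product['calories'] = 1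
--
-- 	acc = 1
-- 	for v in final_product.values():
-- 		acc *= max(0, v)
--
-- 	return acc
-- ===== SOURCE B (Python) =====
-- def cook(totals, ingredient_data):
--     def weighted(prop):
--         return sum(ingredient_data[i][prop] * totals[i] for i in range(len(totals)))
--
--     if weighted('calories') != 500:
--         return -1
--
--     acc = 1
--     for prop in ('capacity', 'durability', 'flavor', 'texture'):
--         acc *= max(0, weighted(prop))
--     return acc
-- ===== Notes on version B (the rewrite author's own statement) =====
-- stated objective: simpler
-- what changed: B drops A's mutable 5-key dict accumulator entirely: it computes the calorie total first and returns -1 early, then multiplies per-property weighted sums directly, never materialising or patching a dict ('calories' = 1 trick gone).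
import Mathlib
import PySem

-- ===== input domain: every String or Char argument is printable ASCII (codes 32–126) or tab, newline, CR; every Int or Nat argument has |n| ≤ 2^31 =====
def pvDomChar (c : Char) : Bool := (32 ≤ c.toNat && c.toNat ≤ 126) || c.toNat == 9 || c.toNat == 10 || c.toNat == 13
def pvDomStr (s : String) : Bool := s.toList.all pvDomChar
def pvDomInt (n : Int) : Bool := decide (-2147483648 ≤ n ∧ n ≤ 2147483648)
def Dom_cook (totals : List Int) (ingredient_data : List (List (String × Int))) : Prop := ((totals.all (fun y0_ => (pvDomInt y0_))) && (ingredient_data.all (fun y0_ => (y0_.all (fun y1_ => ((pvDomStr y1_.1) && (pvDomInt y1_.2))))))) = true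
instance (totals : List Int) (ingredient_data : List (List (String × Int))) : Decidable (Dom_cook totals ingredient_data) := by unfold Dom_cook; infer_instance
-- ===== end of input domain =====

-- ===== PORT A =====
-- B replaces A's mutable 5-key dict accumulator by an early calorie check plus direct
-- per-property weighted sums (objective: simpler). Return-value equivalence only; neither mutates.

-- dict __getitem__ on an association list (first match); the 0 default is never reached under Pre_
def dget (d : List (String × Int)) (k : String) : Int :=
  ((d.find? (fun p => p.1 == k)).map (·.2)).getD 0

def cook (totals : List Int) (ingredient_data : List (List (String × Int))) : Int :=
  -- final_product = {'capacity': 0, …, 'calories': 0}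
  let fp0 : PySem.Dict String Int :=
    PySem.Dict.mk [("capacity", 0), ("durability", 0), ("flavor", 0), ("texture", 0), ("calories", 0)]
  -- for i in range(0, len(totals)): … for prop in final_product: final_product[prop] += …
  -- totals[i] / ingredient_data[i] via getD: exact inside Pre_ (the index is in range there)
  let fp := (List.range totals.length).foldl (fun fp i =>
    let total := totals.getD i 0
    let cid := ingredient_data.getD i []
    fp.keys.foldl (fun fp prop => fp.modify prop 0 (· + dget cid prop * total)) fp) fp0
  if fp.getD "calories" 0 ≠ 500 then -1
  else
    let fp := fp.insert "calories" 1
    fp.values.foldl (fun acc v => acc * max 0 v) 1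

-- ===== PORT B =====
-- weighted(prop) = sum(ingredient_data[i][prop] * totals[i] for i in range(len(totals)))
def weighted (totals : List Int) (ingredient_data : List (List (String × Int))) (prop : String) : Int :=
  (List.range totals.length).foldl (fun s i => s + dget (ingredient_data.getD i []) prop * totals.getD i 0) 0

def cook_alt (totals : List Int) (ingredient_data : List (List (String × Int))) : Int :=
  if weighted totals ingredient_data "calories" ≠ 500 then -1
  else (["capacity", "durability", "flavor", "texture"] : List String).foldl
    (fun acc prop => acc * max 0 (weighted totals ingredient_data prop)) 1

-- ===== PRECONDITION & SPEC =====
-- Pre_ excludes exactly the inputs where the Python A raises: ingredient_data shorter than totals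
-- (IndexError) or one of the first len(totals) ingredient dicts missing one of the five keys (KeyError).
def Pre_cook (totals : List Int) (ingredient_data : List (List (String × Int))) : Prop :=
  totals.length ≤ ingredient_data.length ∧
  ∀ d ∈ ingredient_data.take totals.length,
    ∀ k ∈ (["capacity", "durability", "flavor", "texture", "calories"] : List String), k ∈ d.map (·.1)
instance (totals : List Int) (ingredient_data : List (List (String × Int))) : Decidable (Pre_cook totals ingredient_data) := by unfold Pre_cook; infer_instance
def pvWitness_cook : List Int × (List (List (String × Int))) :=
  ([1], [[("capacity", 2), ("durability", 3), ("flavor", 4), ("texture", 5), ("calories", 500)]])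

def Spec_cook (totals : List Int) (ingredient_data : List (List (String × Int))) (out : Int) : Prop := out = cook_alt totals ingredient_data
instance (totals : List Int) (ingredient_data : List (List (String × Int))) (out : Int) : Decidable (Spec_cook totals ingredient_data out) := by unfold Spec_cook; infer_instance

-- ===== CLAIM (what is proved, stated in full; the proofs are below) =====
def Claim_equal_cook : Prop := ∀ (totals : List Int) (ingredient_data : List (List (String × Int))), Dom_cook totals ingredient_data → Pre_cook totals ingredient_data → Spec_cook totals ingredient_data (cook totals ingredient_data)

-- ===== LEMMAS AND PROOFS =====

-- partial weighted sum over the first m indices (weighted = psum at m = totals.length)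
def psum (totals : List Int) (ingredient_data : List (List (String × Int))) (prop : String) (m : Nat) : Int :=
  (List.range m).foldl (fun s i => s + dget (ingredient_data.getD i []) prop * totals.getD i 0) 0

def mkfp (a b c d e : Int) : PySem.Dict String Int :=
  PySem.Dict.mk [("capacity", a), ("durability", b), ("flavor", c), ("texture", d), ("calories", e)]

lemma psum_succ (totals : List Int) (ingredient_data : List (List (String × Int))) (prop : String) (m : Nat) :
    psum totals ingredient_data prop (m + 1)
      = psum totals ingredient_data prop m + dget (ingredient_data.getD m []) prop * totals.getD m 0 := by
  simp [psum, List.range_succ]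

lemma step_mkfp (cid : List (String × Int)) (t a b c d e : Int) :
    (mkfp a b c d e).keys.foldl (fun fp prop => fp.modify prop 0 (· + dget cid prop * t)) (mkfp a b c d e)
      = mkfp (a + dget cid "capacity" * t) (b + dget cid "durability" * t)
          (c + dget cid "flavor" * t) (d + dget cid "texture" * t) (e + dget cid "calories" * t) := by
  simp [mkfp, PySem.Dict.keys, PySem.Dict.modify, PySem.Dict.getD, PySem.Dict.get?, PySem.Dict.insert,
    List.foldl]

lemma loop_mkfp (totals : List Int) (ingredient_data : List (List (String × Int))) (m : Nat)
    (a b c d e : Int) :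
    (List.range m).foldl (fun fp i =>
        let total := totals.getD i 0
        let cid := ingredient_data.getD i []
        fp.keys.foldl (fun fp prop => fp.modify prop 0 (· + dget cid prop * total)) fp) (mkfp a b c d e)
      = mkfp (a + psum totals ingredient_data "capacity" m)
          (b + psum totals ingredient_data "durability" m)
          (c + psum totals ingredient_data "flavor" m)
          (d + psum totals ingredient_data "texture" m)
          (e + psum totals ingredient_data "calories" m) := by
  induction m generalizing a b c d e with
  | zero => simp [psum]
  | succ m ih =>
    rw [List.range_succ, List.foldl_append, ih]
    simp only [List.foldl_cons, List.foldl_nil, step_mkfp, psum_succ]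
    ring_nf

-- ===== VERDICT (by name: the statement is the Claim_ definition above) =====
theorem cook_spec : Claim_equal_cook := by
  intro totals ingredient_data _ _
  unfold Spec_cook cook cook_alt
  have hloop := loop_mkfp totals ingredient_data totals.length 0 0 0 0 0
  simp only [zero_add, mkfp] at hloop
  have hw : ∀ prop, weighted totals ingredient_data prop = psum totals ingredient_data prop totals.length := fun _ => rfl
  simp only [hloop, hw]
  simp [PySem.Dict.getD, PySem.Dict.get?, PySem.Dict.insert, PySem.Dict.contains,
    PySem.Dict.values, List.find?, List.foldl]
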